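-- pv_equiv track=rewrite | github.com/NJUNLP/GTS | code/BertModel/utils.py | get_opinions
-- ===== SOURCE A (Python) =====
-- def get_opinions(tags, length, ignore_index=-1):
--     spans = []
--     start = -1
--     for i in range(length):
--         if tags[i][i] == ignore_index: continue
--         elif tags[i][i] == 2:
--             if start == -1:
--                 start = i
--         elif tags[i][i] != 2:
--             if start != -1:
--                 spans.append([start, i - 1])
--                 start = -1
--     if start != -1:
--         spans.append([start, length-1])
--     return spans
-- ===== SOURCE B (Python) =====
-- def get_opinions(tags, length, ignore_index=-1):
--     # Pass 1: split the diagonal into maximal runs of (index, value) pairs,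
--     # cutting at every "closing" position (value neither ignore_index nor 2).
--     runs = []
--     cur = []
--     for i in range(length):
--         v = tags[i][i]
--         if v != ignore_index and v != 2:
--             runs.append(cur)
--             cur = []
--         else:
--             cur.append((i, v))
--     runs.append(cur)
--     # Pass 2: each run contributes a span [first opening index, last index of run].
--     spans = []
--     for run in runs:
--         starts = [i for (i, v) in run if v != ignore_index]
--         if starts:
--             spans.append([starts[0], run[-1][0]])
--     return spans
-- ===== Notes on version B (the rewrite author's own statement) =====
-- stated objective: alternative
-- what changed: Replaces A's single stateful scan with a start sentinel by a two-phase decomposition: first split the diagonal into maximal runs cut at closing values, then map each run to a span [first opening index, last index of run].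
import Mathlib
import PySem

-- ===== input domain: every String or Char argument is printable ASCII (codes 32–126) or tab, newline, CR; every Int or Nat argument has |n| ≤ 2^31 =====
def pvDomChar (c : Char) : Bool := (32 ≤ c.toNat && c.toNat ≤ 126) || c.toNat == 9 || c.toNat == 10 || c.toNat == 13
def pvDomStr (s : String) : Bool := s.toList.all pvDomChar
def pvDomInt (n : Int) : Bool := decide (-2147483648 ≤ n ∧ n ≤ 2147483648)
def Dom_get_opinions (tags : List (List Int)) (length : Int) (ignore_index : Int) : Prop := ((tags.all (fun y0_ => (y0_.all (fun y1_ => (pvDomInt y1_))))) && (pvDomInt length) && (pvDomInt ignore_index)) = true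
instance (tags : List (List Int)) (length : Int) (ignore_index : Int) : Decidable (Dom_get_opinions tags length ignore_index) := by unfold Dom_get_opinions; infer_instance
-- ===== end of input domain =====

-- B replaces A's single stateful scan by a two-phase decomposition (cut into runs, then
-- flush each run); equivalence is about return values (neither program mutates arguments).

-- tags[i][i] (Pre_ guarantees the indices are in range)
def pvDiag (tags : List (List Int)) (i : Int) : Int :=
  PySem.List.pyGetD (PySem.List.pyGetD tags i []) i 0

-- ===== PORT A =====
-- loop body of A's for-loop over the state (spans, start)
def pvStepA (tags : List (List Int)) (ignore_index : Int)
    (st : List (List Int) × Int) (i : Int) : List (List Int) × Int :=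
  if pvDiag tags i = ignore_index then st
  else if pvDiag tags i = 2 then (st.1, if st.2 = -1 then i else st.2)
  else if st.2 ≠ -1 then (st.1 ++ [[st.2, i - 1]], -1) else st

def get_opinions (tags : List (List Int)) (length : Int) (ignore_index : Int) : List (List Int) :=
  let r := (PySem.List.pyRange 0 length 1).foldl (pvStepA tags ignore_index) ([], -1)
  if r.2 ≠ -1 then r.1 ++ [[r.2, length - 1]] else r.1

-- ===== PORT B =====
-- pass-1 loop body of B over the state (runs, cur)
def pvStepB (tags : List (List Int)) (ignore_index : Int)
    (st : List (List (Int × Int)) × List (Int × Int)) (i : Int) :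
    List (List (Int × Int)) × List (Int × Int) :=
  if pvDiag tags i ≠ ignore_index ∧ pvDiag tags i ≠ 2 then (st.1 ++ [st.2], [])
  else (st.1, st.2 ++ [(i, pvDiag tags i)])

-- the comprehension's condition, and the 'starts' comprehension itself
def pvOpen (ignore_index : Int) (p : Int × Int) : Bool := p.2 != ignore_index
def pvStarts (ignore_index : Int) (run : List (Int × Int)) : List Int :=
  (run.filter (pvOpen ignore_index)).map Prod.fst

-- pass-2 body: one run's contribution (starts comprehension, then run[-1][0])
def pvFlush (ignore_index : Int) (spans : List (List Int)) (run : List (Int × Int)) : List (List Int) :=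
  match pvStarts ignore_index run with
  | [] => spans
  | s :: _ => spans ++ [[s, (PySem.List.pyGetD run (-1) (0, 0)).1]]

def get_opinions_alt (tags : List (List Int)) (length : Int) (ignore_index : Int) : List (List Int) :=
  let r := (PySem.List.pyRange 0 length 1).foldl (pvStepB tags ignore_index) ([], [])
  (r.1 ++ [r.2]).foldl (pvFlush ignore_index) []

-- ===== PRECONDITION & SPEC =====
-- Pre_: exactly the inputs where Python A returns (every tags[i][i] for 0 ≤ i < length is
-- in range); elsewhere A raises IndexError.
def Pre_get_opinions (tags : List (List Int)) (length : Int) (ignore_index : Int) : Prop :=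
  (0 < length → length ≤ (tags.length : Int)) ∧
  ∀ p ∈ tags.zipIdx, (p.2 : Int) < length → p.2 < p.1.length
instance (tags : List (List Int)) (length : Int) (ignore_index : Int) : Decidable (Pre_get_opinions tags length ignore_index) := by unfold Pre_get_opinions; infer_instance

def pvWitness_get_opinions : List (List Int) × Int × Int := ([[2, 0], [0, 1]], 2, -1)

def Spec_get_opinions (tags : List (List Int)) (length : Int) (ignore_index : Int) (out : List (List Int)) : Prop := out = get_opinions_alt tags length ignore_index
instance (tags : List (List Int)) (length : Int) (ignore_index : Int) (out : List (List Int)) : Decidable (Spec_get_opinions tags length ignore_index out) := by unfold Spec_get_opinions; infer_instance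

-- ===== CLAIM (what is proved, stated in full; the proofs are below) =====
def Claim_equal_get_opinions : Prop := ∀ (tags : List (List Int)) (length : Int) (ignore_index : Int), Dom_get_opinions tags length ignore_index → Pre_get_opinions tags length ignore_index → Spec_get_opinions tags length ignore_index (get_opinions tags length ignore_index)

-- ===== LEMMAS AND PROOFS =====

-- step-function characterisations
theorem pvStepA_ig {tags : List (List Int)} {ig i : Int} (st : List (List Int) × Int)
    (h : pvDiag tags i = ig) : pvStepA tags ig st i = st := by
  unfold pvStepA; rw [if_pos h]

theorem pvStepA_two {tags : List (List Int)} {ig i : Int} (st : List (List Int) × Int)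
    (hig : ¬ pvDiag tags i = ig) (h2 : pvDiag tags i = 2) :
    pvStepA tags ig st i = (st.1, if st.2 = -1 then i else st.2) := by
  unfold pvStepA; rw [if_neg hig, if_pos h2]

theorem pvStepA_close {tags : List (List Int)} {ig i : Int} (st : List (List Int) × Int)
    (hig : ¬ pvDiag tags i = ig) (h2 : ¬ pvDiag tags i = 2) :
    pvStepA tags ig st i = if st.2 ≠ -1 then (st.1 ++ [[st.2, i - 1]], -1) else st := by
  unfold pvStepA; rw [if_neg hig, if_neg h2]

theorem pvStepB_cut {tags : List (List Int)} {ig i : Int}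
    (st : List (List (Int × Int)) × List (Int × Int))
    (hig : ¬ pvDiag tags i = ig) (h2 : ¬ pvDiag tags i = 2) :
    pvStepB tags ig st i = (st.1 ++ [st.2], []) := by
  unfold pvStepB; rw [if_pos ⟨hig, h2⟩]

theorem pvStepB_keep {tags : List (List Int)} {ig i : Int}
    (st : List (List (Int × Int)) × List (Int × Int))
    (h : pvDiag tags i = ig ∨ pvDiag tags i = 2) :
    pvStepB tags ig st i = (st.1, st.2 ++ [(i, pvDiag tags i)]) := by
  unfold pvStepB; rw [if_neg (by tauto)]

-- starts / start-sentinel toolkit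
theorem mem_pvStarts {ig s : Int} {xs : List (Int × Int)} (h : s ∈ pvStarts ig xs) :
    ∃ p ∈ xs, p.1 = s := by
  unfold pvStarts at h
  rcases List.mem_map.mp h with ⟨p, hp, rfl⟩
  exact ⟨p, List.mem_of_mem_filter hp, rfl⟩

theorem pvStarts_append_not_open {ig : Int} {x : Int × Int} (xs : List (Int × Int))
    (h : pvOpen ig x = false) : pvStarts ig (xs ++ [x]) = pvStarts ig xs := by
  simp [pvStarts, List.filter_append, h]

theorem pvStarts_append_open {ig : Int} {x : Int × Int} (xs : List (Int × Int))
    (h : pvOpen ig x = true) : pvStarts ig (xs ++ [x]) = pvStarts ig xs ++ [x.1] := by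
  simp [pvStarts, List.filter_append, h]

-- the value A's 'start' holds, read off B's current run
def pvStartOf (ig : Int) (cur : List (Int × Int)) : Int :=
  match pvStarts ig cur with
  | [] => -1
  | s :: _ => s

theorem pvStartOf_append_not_open {ig : Int} {x : Int × Int} (xs : List (Int × Int))
    (h : pvOpen ig x = false) : pvStartOf ig (xs ++ [x]) = pvStartOf ig xs := by
  unfold pvStartOf; rw [pvStarts_append_not_open xs h]

theorem pvStartOf_append_open {ig : Int} {x : Int × Int} (xs : List (Int × Int))
    (h : pvOpen ig x = true) (hnn : ∀ p ∈ xs, 0 ≤ p.1) :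
    pvStartOf ig (xs ++ [x]) = if pvStartOf ig xs = -1 then x.1 else pvStartOf ig xs := by
  unfold pvStartOf
  rw [pvStarts_append_open xs h]
  cases hf : pvStarts ig xs with
  | nil => simp
  | cons s t =>
    have hs : s ∈ pvStarts ig xs := by rw [hf]; exact List.mem_cons_self
    rcases mem_pvStarts hs with ⟨p, hp, rfl⟩
    have := hnn _ hp
    simp only [List.cons_append]
    rw [if_neg (by omega)]

-- one run's contribution, characterised via the start sentinel
def pvFlushOne (ig : Int) (run : List (Int × Int)) : List (List Int) := pvFlush ig [] run

theorem pvFlush_eq_append (ig : Int) (spans : List (List Int)) (run : List (Int × Int)) :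
    pvFlush ig spans run = spans ++ pvFlushOne ig run := by
  unfold pvFlushOne pvFlush
  cases pvStarts ig run <;> simp

theorem pvFoldl_flush (ig : Int) (rs : List (List (Int × Int))) (init : List (List Int)) :
    rs.foldl (pvFlush ig) init = init ++ rs.flatMap (pvFlushOne ig) := by
  induction rs generalizing init with
  | nil => simp
  | cons r rs ih => simp [List.foldl_cons, pvFlush_eq_append, ih]

theorem pvFlushOne_char (ig : Int) (a2 : Int) (cur : List (Int × Int)) (m : Int)
    (h2 : a2 = pvStartOf ig cur) (h3 : ∀ p ∈ cur, 0 ≤ p.1)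
    (h4 : cur = [] ∨ (PySem.List.pyGetD cur (-1) (0, 0)).1 = m) :
    pvFlushOne ig cur = if a2 = -1 then [] else [[a2, m]] := by
  unfold pvFlushOne pvFlush
  cases hf : pvStarts ig cur with
  | nil =>
    unfold pvStartOf at h2; rw [hf] at h2
    rw [if_pos h2]
  | cons s t =>
    unfold pvStartOf at h2; rw [hf] at h2
    have hs : s ∈ pvStarts ig cur := by rw [hf]; exact List.mem_cons_self
    rcases mem_pvStarts hs with ⟨p, hp, hps⟩
    have hnn := h3 _ hp
    have h2' : a2 = s := h2
    have hne : cur ≠ [] := by intro h; rw [h] at hp; simp at hp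
    rcases h4 with h4 | h4
    · exact absurd h4 hne
    · rw [if_neg (by omega), h2', h4]
      simp

-- the loop invariant tying A's state to B's state after processing indices 0..n-1
def pvInv (ig : Int) (n : Nat)
    (a : List (List Int) × Int) (b : List (List (Int × Int)) × List (Int × Int)) : Prop :=
  a.1 = b.1.flatMap (pvFlushOne ig) ∧
  a.2 = pvStartOf ig b.2 ∧
  (∀ p ∈ b.2, 0 ≤ p.1) ∧
  (b.2 = [] ∨ (PySem.List.pyGetD b.2 (-1) (0, 0)).1 = (n : Int) - 1)

theorem pvInv_holds (tags : List (List Int)) (ig : Int) (n : Nat) :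
    pvInv ig n
      ((PySem.List.pyRange 0 (n : Int) 1).foldl (pvStepA tags ig) ([], -1))
      ((PySem.List.pyRange 0 (n : Int) 1).foldl (pvStepB tags ig) ([], [])) := by
  induction n with
  | zero =>
    rw [show ((0 : Nat) : Int) = 0 from rfl, PySem.List.pyRange_one_eq_nil le_rfl]
    exact ⟨rfl, rfl, by simp, Or.inl rfl⟩
  | succ n ih =>
    have hsplit : PySem.List.pyRange 0 (((n : Nat) + 1 : Nat) : Int) 1
        = PySem.List.pyRange 0 (n : Int) 1 ++ [(n : Int)] := by
      push_cast
      exact PySem.List.pyRange_one_succ_right (by positivity)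
    rw [hsplit, List.foldl_append, List.foldl_append]
    set a := (PySem.List.pyRange 0 (n : Int) 1).foldl (pvStepA tags ig) ([], -1) with ha
    set b := (PySem.List.pyRange 0 (n : Int) 1).foldl (pvStepB tags ig) ([], []) with hb
    obtain ⟨h1, h2, h3, h4⟩ := ih
    simp only [List.foldl_cons, List.foldl_nil]
    have hcast : ((((n : Nat) + 1 : Nat)) : Int) - 1 = (n : Int) := by push_cast; ring
    by_cases hig : pvDiag tags (n : Int) = ig
    · -- ignored value: A continues, B appends (n, v) to the current run without opening
      rw [pvStepA_ig a hig, pvStepB_keep b (Or.inl hig)]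
      have hop : pvOpen ig ((n : Int), pvDiag tags (n : Int)) = false := by
        simp [pvOpen, hig]
      refine ⟨h1, ?_, ?_, ?_⟩
      · rw [h2, pvStartOf_append_not_open b.2 hop]
      · intro p hp
        rcases List.mem_append.mp hp with h | h
        · exact h3 _ h
        · simp only [List.mem_singleton] at h
          simp [h]
      · right
        rw [PySem.List.pyGetD_neg_one_append_singleton, hcast]
    · by_cases h2v : pvDiag tags (n : Int) = 2
      · -- opening value: A may set start, B appends (n, 2) to the current run
        rw [pvStepA_two a hig h2v, pvStepB_keep b (Or.inr h2v)]
        have hop : pvOpen ig ((n : Int), pvDiag tags (n : Int)) = true := by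
          simp [pvOpen, hig]
        refine ⟨h1, ?_, ?_, ?_⟩
        · rw [h2, pvStartOf_append_open b.2 hop h3]
        · intro p hp
          rcases List.mem_append.mp hp with h | h
          · exact h3 _ h
          · simp only [List.mem_singleton] at h
            simp [h]
        · right
          rw [PySem.List.pyGetD_neg_one_append_singleton, hcast]
      · -- closing value: A flushes the open span (if any), B cuts the run
        rw [pvStepA_close a hig h2v, pvStepB_cut b hig h2v]
        have hchar := pvFlushOne_char ig a.2 b.2 ((n : Int) - 1) h2 h3 h4
        refine ⟨?_, ?_, by simp, Or.inl rfl⟩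
        · rw [List.flatMap_append, List.flatMap_cons, List.flatMap_nil, List.append_nil,
            ← h1, hchar]
          by_cases hst : a.2 = -1
          · rw [if_pos hst, if_neg (by simpa using hst), List.append_nil]
          · rw [if_neg hst, if_pos (by simpa using hst)]
        · by_cases hst : a.2 = -1
          · rw [if_neg (by simpa using hst)]
            exact hst
          · rw [if_pos (by simpa using hst)]
            rfl

-- assembling the post-loop flushes on both sides
theorem pv_main (tags : List (List Int)) (L ig : Int) :
    get_opinions tags L ig = get_opinions_alt tags L ig := by
  have hrange : PySem.List.pyRange 0 L 1 = PySem.List.pyRange 0 (L.toNat : Int) 1 := by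
    by_cases h : 0 ≤ L
    · rw [Int.toNat_of_nonneg h]
    · rw [PySem.List.pyRange_one_eq_nil (by omega), PySem.List.pyRange_one_eq_nil (by omega)]
  have hinv := pvInv_holds tags ig L.toNat
  unfold get_opinions get_opinions_alt
  rw [hrange]
  set a := (PySem.List.pyRange 0 (L.toNat : Int) 1).foldl (pvStepA tags ig) ([], -1) with ha
  set b := (PySem.List.pyRange 0 (L.toNat : Int) 1).foldl (pvStepB tags ig) ([], []) with hb
  obtain ⟨h1, h2, h3, h4⟩ := hinv
  rw [pvFoldl_flush, List.flatMap_append, List.flatMap_cons, List.flatMap_nil,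
    List.append_nil, List.nil_append, ← h1,
    pvFlushOne_char ig a.2 b.2 ((L.toNat : Int) - 1) h2 h3 h4]
  by_cases hst : a.2 = -1
  · rw [if_neg (by simpa using hst), if_pos hst, List.append_nil]
  · rw [if_pos (by simpa using hst), if_neg hst]
    -- an open span forces a nonempty run, hence L > 0 and (L.toNat : Int) - 1 = L - 1
    have hne : b.2 ≠ [] := by
      unfold pvStartOf at h2
      cases hf : pvStarts ig b.2 with
      | nil => rw [hf] at h2; exact absurd h2 hst
      | cons s t =>
        have hs : s ∈ pvStarts ig b.2 := by rw [hf]; exact List.mem_cons_self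
        rcases mem_pvStarts hs with ⟨p, hp, _⟩
        intro h; rw [h] at hp; simp at hp
    have hL : 0 < L := by
      by_contra h
      apply hne
      rw [hb, PySem.List.pyRange_one_eq_nil (by omega)]
      rfl
    rw [show ((L.toNat : Int)) - 1 = L - 1 by omega]

-- ===== VERDICT (by name: the statement is the Claim_ definition above) =====
theorem get_opinions_spec : Claim_equal_get_opinions := by
  intro tags length ignore_index _ _
  unfold Spec_get_opinions
  exact pv_main tags length ignore_index
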